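-- pv_equiv track=rewrite | github.com/CrapTheCoder/Competitive-Programming | CodeChef/PYTH 3.6/BINADD/28271088.py | solve
-- ===== SOURCE A (Python) =====
-- def solve(a, b):
--     if b == '0':
--         return 0
--
--     a = '0' + a
--     b = '0' + b
--
--     n = len(a)
--     m = len(b)
--
--     if m > n:
--         a = a.zfill(m)
--         n = m
--
--     else:
--         b = b.zfill(n)
--
--     m = 0
--     v1 = v2 = 0
--
--     for i in range(1, n):
--         if a[i] == b[i] == '1':
--             m = max(v1 + 1, v2 + 1, m)
--
--             v1 = v2 = 0
--
--         elif a[i] == b[i] == '0':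
--             v1 = v2 = 0
--
--         else:
--             v1 += 1
--             v2 += 1
--
--     return m + 1
-- ===== SOURCE B (Python) =====
-- def solve(a, b):
--     if b == '0':
--         return 0
--
--     a = '0' + a
--     b = '0' + b
--
--     w = max(len(a), len(b))
--     a = '0' * (w - len(a)) + a
--     b = '0' * (w - len(b)) + b
--
--     pairs = list(zip(a, b))[1:]
--
--     # pass 1: prefix array -- pre[k] = length of the run of positions just
--     # before pairs[k] that neither matched as '0' nor matched as '1'
--     pre = []
--     run = 0
--     for x, y in pairs:
--         pre.append(run)
--         run = 0 if (x == y and x in '01') else run + 1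
--
--     # pass 2: best candidate over the both-'1' anchor positions
--     m = 0
--     for (x, y), r in zip(pairs, pre):
--         if x == '1' and y == '1':
--             m = max(m, r + 1)
--
--     return m + 1
-- ===== Notes on version B (the rewrite author's own statement) =====
-- stated objective: alternative
-- what changed: Replaces A's single loop with one running mismatch counter (held in two redundant variables v1,v2 and updated branch-by-branch) by a two-pass decomposition: pass 1 builds a prefix array of mismatch-run lengths over the zipped padded strings, pass 2 scans the both-'1' anchor positions taking the max of run+1; zfill replaced by plain '0'-padding to the max length.
import Mathlib
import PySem

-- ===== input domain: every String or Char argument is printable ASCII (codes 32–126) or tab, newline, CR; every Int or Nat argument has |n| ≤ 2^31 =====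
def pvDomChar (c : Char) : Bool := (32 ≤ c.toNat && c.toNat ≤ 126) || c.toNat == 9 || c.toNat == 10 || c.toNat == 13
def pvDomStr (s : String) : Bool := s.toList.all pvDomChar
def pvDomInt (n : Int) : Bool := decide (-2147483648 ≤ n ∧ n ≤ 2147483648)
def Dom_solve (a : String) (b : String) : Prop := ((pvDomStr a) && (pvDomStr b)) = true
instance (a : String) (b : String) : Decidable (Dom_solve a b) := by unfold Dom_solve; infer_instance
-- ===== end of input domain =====

-- B replaces A's single running-counter loop by a two-pass decomposition (prefix
-- array of mismatch-run lengths, then a scan of the both-'1' anchor positions);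
-- same O(n) cost, alternative structure.

-- ===== PORT A =====
-- body of A's for-loop; state is (m, v1, v2)
def stepA (st : Int × Int × Int) (x : Char) (y : Char) : Int × Int × Int :=
  if x = y ∧ x = '1' then (max (max (st.2.1 + 1) (st.2.2 + 1)) st.1, 0, 0)
  else if x = y ∧ x = '0' then (st.1, 0, 0)
  else (st.1, st.2.1 + 1, st.2.2 + 1)

def solve (a : String) (b : String) : Int :=
  if b == "0" then 0
  else
    let aL0 := '0' :: a.toList          -- a = '0' + a
    let bL0 := '0' :: b.toList          -- b = '0' + b
    let n : Int := PySem.List.len aL0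
    let m : Int := PySem.List.len bL0
    -- zfill: exact here, both strings start with the prepended '0' (no sign char)
    let s := if m > n then (PySem.Chars.zfill aL0 m, m, bL0)
             else (aL0, n, PySem.Chars.zfill bL0 n)
    let aL := s.1
    let n' := s.2.1
    let bL := s.2.2
    let st := (PySem.List.pyRange 1 n').foldl
      (fun st i => stepA st (PySem.List.pyGetD aL i ' ') (PySem.List.pyGetD bL i ' ')) (0, 0, 0)
    st.1 + 1

-- ===== PORT B =====
-- pass 1 body: s = (pre, run); pre.append(run); run = 0 if (x == y and x in '01') else run + 1
def stepPre (s : List Int × Int) (xy : Char × Char) : List Int × Int :=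
  (s.1 ++ [s.2], if xy.1 = xy.2 ∧ (xy.1 = '0' ∨ xy.1 = '1') then 0 else s.2 + 1)

-- pass 2 body: if x == '1' and y == '1': m = max(m, r + 1)
def stepBest (m : Int) (pr : (Char × Char) × Int) : Int :=
  if pr.1.1 = '1' ∧ pr.1.2 = '1' then max m (pr.2 + 1) else m

def solve_alt (a : String) (b : String) : Int :=
  if b == "0" then 0
  else
    let aL0 := '0' :: a.toList
    let bL0 := '0' :: b.toList
    let w := max aL0.length bL0.length
    let aL := List.replicate (w - aL0.length) '0' ++ aL0   -- '0' * (w - len(a)) + a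
    let bL := List.replicate (w - bL0.length) '0' ++ bL0
    let pairs := (aL.zip bL).drop 1                        -- list(zip(a, b))[1:]
    let p1 := pairs.foldl stepPre ([], 0)
    let m := (pairs.zip p1.1).foldl stepBest 0
    m + 1

-- ===== PRECONDITION & SPEC =====
def Spec_solve (a : String) (b : String) (out : Int) : Prop := out = solve_alt a b
instance (a : String) (b : String) (out : Int) : Decidable (Spec_solve a b out) := by unfold Spec_solve; infer_instance

-- ===== CLAIM (what is proved, stated in full; the proofs are below) =====
def Claim_equal_solve : Prop := ∀ (a : String) (b : String), Dom_solve a b → Spec_solve a b (solve a b)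

-- ===== LEMMAS AND PROOFS =====

-- the prefix array B's first pass builds, as a structural recursion
def preArr : List (Char × Char) → Int → List Int
  | [], _ => []
  | p :: t, v => v :: preArr t (if p.1 = p.2 ∧ (p.1 = '0' ∨ p.1 = '1') then 0 else v + 1)

lemma pass1_eq (ps : List (Char × Char)) : ∀ (acc : List Int) (v : Int),
    (ps.foldl stepPre (acc, v)).1 = acc ++ preArr ps v := by
  induction ps with
  | nil => simp [preArr]
  | cons p t ih =>
      intro acc v
      simp only [List.foldl_cons, stepPre, preArr, ih]
      simp

-- the simulation invariant: A's loop with v1 = v2 = v computes the same best m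
-- as B's scan of the pairs zipped with the prefix array started at v
lemma main_inv (ps : List (Char × Char)) : ∀ (m v : Int),
    (ps.foldl (fun st p => stepA st p.1 p.2) (m, v, v)).1
      = (ps.zip (preArr ps v)).foldl stepBest m := by
  induction ps with
  | nil => intro m v; simp [preArr]
  | cons p t ih =>
      intro m v
      simp only [preArr]
      by_cases h1 : p.1 = p.2 ∧ p.1 = '1'
      · have hp2 : p.2 = '1' := h1.1 ▸ h1.2
        rw [if_pos (Or.inr h1.2 |> And.intro h1.1), List.zip_cons_cons,
            List.foldl_cons, List.foldl_cons]
        have eA : stepA (m, v, v) p.1 p.2 = (max (max (v + 1) (v + 1)) m, 0, 0) := by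
          simp [stepA, h1.1, hp2]
        have eB : stepBest m (p, v) = max m (v + 1) := by
          simp [stepBest, h1.2, hp2]
        rw [eA, eB, ih]
        have hmx : max (max (v + 1) (v + 1)) m = max m (v + 1) := by omega
        rw [hmx]
      · by_cases h0 : p.1 = p.2 ∧ p.1 = '0'
        · rw [if_pos (Or.inl h0.2 |> And.intro h0.1), List.zip_cons_cons,
              List.foldl_cons, List.foldl_cons]
          have hq2 : p.2 = '0' := h0.1 ▸ h0.2
          have eA : stepA (m, v, v) p.1 p.2 = (m, 0, 0) := by
            simp [stepA, h0.1, hq2]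
          have eB : stepBest m (p, v) = m := by
            have : ¬ (p.1 = '1' ∧ p.2 = '1') := by
              rintro ⟨hx, _⟩; exact absurd (h0.2 ▸ hx) (by decide)
            simp [stepBest, this]
          rw [eA, eB, ih]
        · have hnr : ¬ (p.1 = p.2 ∧ (p.1 = '0' ∨ p.1 = '1')) := by
            rintro ⟨he, hz | ho⟩
            · exact h0 ⟨he, hz⟩
            · exact h1 ⟨he, ho⟩
          rw [if_neg hnr, List.zip_cons_cons, List.foldl_cons, List.foldl_cons]
          have eA : stepA (m, v, v) p.1 p.2 = (m, v + 1, v + 1) := by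
            simp [stepA, h1, h0]
          have eB : stepBest m (p, v) = m := by
            have : ¬ (p.1 = '1' ∧ p.2 = '1') := by
              rintro ⟨hx, hy⟩; exact h1 ⟨hx.trans hy.symm, hx⟩
            simp [stepBest, this]
          rw [eA, eB, ih]

-- reading both strings at index i is reading the zipped list at index i
lemma fold_range_eq_fold_zip (xs ys : List Char) (h : ys.length = xs.length)
    (st0 : Int × Int × Int) :
    (PySem.List.pyRange 1 ((xs.length : Int))).foldl
        (fun st i => stepA st (PySem.List.pyGetD xs i ' ') (PySem.List.pyGetD ys i ' ')) st0
      = ((xs.zip ys).drop 1).foldl (fun st p => stepA st p.1 p.2) st0 := by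
  have hlen : (xs.zip ys).length = xs.length := by simp [List.length_zip, h]
  have hlen' : ((xs.length : Int)) = PySem.List.len (xs.zip ys) := by
    simp [PySem.List.len_eq, hlen]
  rw [hlen']
  have hkey := PySem.List.foldl_pyRange_pyGetD (xs.zip ys) (' ', ' ')
      (fun st p => stepA st p.1 p.2) st0 (a := 1) (by norm_num)
  simp only [Int.toNat_one] at hkey
  rw [← hkey]
  apply PySem.List.foldl_congr_mem
  intro acc i hi
  have hib := (PySem.List.mem_pyRange_one).1 hi
  have h0 : 0 ≤ i := by omega
  have h1 : i < ((xs.zip ys).length : Int) := by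
    have := hib.2; simpa [PySem.List.len_eq] using this
  have hx : i < (xs.length : Int) := by omega
  have hy : i < (ys.length : Int) := by omega
  rw [PySem.List.pyGetD_eq_getElem (xs.zip ys) (' ', ' ') h0 h1,
      PySem.List.pyGetD_eq_getElem xs ' ' h0 hx,
      PySem.List.pyGetD_eq_getElem ys ' ' h0 hy]
  simp [List.getElem_zip]

-- zfill on a string that starts with '0' is plain left-padding
lemma zfill_zero_cons (t : List Char) (w : Int) (_hw : 0 ≤ w) :
    PySem.Chars.zfill ('0' :: t) w
      = List.replicate (w.toNat - (t.length + 1)) '0' ++ '0' :: t := by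
  unfold PySem.Chars.zfill
  by_cases h : w ≤ (('0' :: t).length : Int)
  · have h0 : w.toNat - (t.length + 1) = 0 := by simp at h; omega
    simp [h0]
  · simp only [if_neg h]
    simp

lemma solve_eq_solve_alt (a b : String) : solve a b = solve_alt a b := by
  by_cases hb : b == "0"
  · simp [solve, solve_alt, hb]
  · simp only [solve, solve_alt, PySem.List.len_eq]
    rw [if_neg hb, if_neg hb]
    set aL0 := '0' :: a.toList with haL0
    set bL0 := '0' :: b.toList with hbL0
    by_cases hmn : ((bL0.length : Int) > (aL0.length : Int))
    · -- b side longer: a gets zfilled, w = bL0.length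
      have hw : max aL0.length bL0.length = bL0.length := by omega
      have hza : PySem.Chars.zfill aL0 (bL0.length : Int)
          = List.replicate (bL0.length - aL0.length) '0' ++ aL0 := by
        rw [haL0, zfill_zero_cons _ _ (by positivity)]
        congr 1
      have hrepb : List.replicate (bL0.length - bL0.length) '0' ++ bL0 = bL0 := by simp
      rw [if_pos hmn, hw, hza, hrepb]
      have hlenI : ((bL0.length : Int))
          = (((List.replicate (bL0.length - aL0.length) '0' ++ aL0).length : Nat) : Int) := by
        simp; omega
      rw [hlenI, fold_range_eq_fold_zip _ bL0 (by simp; omega) (0, 0, 0)]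
      rw [pass1_eq, List.nil_append, main_inv]
    · -- a side at least as long: b gets zfilled, w = aL0.length
      have hw : max aL0.length bL0.length = aL0.length := by omega
      have hzb : PySem.Chars.zfill bL0 (aL0.length : Int)
          = List.replicate (aL0.length - bL0.length) '0' ++ bL0 := by
        rw [hbL0, zfill_zero_cons _ _ (by positivity)]
        congr 1
      have hrepa : List.replicate (aL0.length - aL0.length) '0' ++ aL0 = aL0 := by simp
      rw [if_neg hmn, hw, hzb, hrepa]
      rw [fold_range_eq_fold_zip aL0 _ (by simp; omega) (0, 0, 0)]
      rw [pass1_eq, List.nil_append, main_inv]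

-- ===== VERDICT (by name: the statement is the Claim_ definition above) =====
theorem solve_spec : Claim_equal_solve := by
  intro a b _
  unfold Spec_solve
  exact solve_eq_solve_alt a b
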